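-- pv_equiv track=rewrite | github.com/amirashrafizham/PythonCourse | Code Challenges 1/30.reversed_list.py | reversed_list
-- ===== SOURCE A (Python) =====
-- def reversed_list(lst1, lst2):
--     # Reverse List2
--     reversedList = []
--     negativeLength = (len(lst2)*-1)-1
--     counter = -1
--     while counter != negativeLength:
--         reversedList.append(lst2[counter])
--         counter -= 1
--
--     # Check List1 and List2 same
--     trueCounter = 0
--     for i in range(len(lst1)):
--         if(lst1[i] == reversedList[i]):
--             trueCounter += 1
--
--     if(trueCounter == len(lst1)):
--         return True
--
--     return False
-- ===== SOURCE B (Python) =====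
-- def reversed_list(lst1, lst2):
--     # B: compare lst1 with the reversed tail of lst2 directly (slice + reverse),
--     # instead of building a full reversed copy and counting matching positions.
--     return lst2[len(lst2) - len(lst1):][::-1] == lst1
-- ===== Notes on version B (the rewrite author's own statement) =====
-- stated objective: simpler
-- what changed: Replaces A's two loops (hand-built reversed copy of lst2 plus an index loop counting matching positions) with a single slice-and-reverse equality: lst2[len(lst2)-len(lst1):][::-1] == lst1.
import Mathlib
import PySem

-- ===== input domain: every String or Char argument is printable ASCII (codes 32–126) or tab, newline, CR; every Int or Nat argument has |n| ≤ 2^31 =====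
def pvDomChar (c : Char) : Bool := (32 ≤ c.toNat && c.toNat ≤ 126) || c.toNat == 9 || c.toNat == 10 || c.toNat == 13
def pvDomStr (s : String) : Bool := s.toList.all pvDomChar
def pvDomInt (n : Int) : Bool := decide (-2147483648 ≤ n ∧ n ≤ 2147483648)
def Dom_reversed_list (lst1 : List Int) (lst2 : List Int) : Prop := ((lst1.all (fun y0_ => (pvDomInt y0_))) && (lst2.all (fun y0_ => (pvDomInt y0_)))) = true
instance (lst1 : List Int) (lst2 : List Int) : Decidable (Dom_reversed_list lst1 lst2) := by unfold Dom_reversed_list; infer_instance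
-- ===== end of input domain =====

-- B replaces A's two loops (hand-built reversed copy + positional match count) with one
-- slice-and-reverse equality; objective: simpler.

-- ===== PORT A =====
-- A's while loop: counter runs -1, -2, …, -len(lst2); fuel = number of iterations.
-- lst2[counter] is always in range inside this loop, so pyGetD's default is never used.
def buildRev (l : List Int) : Nat → Int → List Int → List Int
  | 0, _, acc => acc
  | n + 1, c, acc => buildRev l n (c - 1) (acc ++ [PySem.List.pyGetD l c 0])

def reversed_list (lst1 : List Int) (lst2 : List Int) : Bool :=
  let reversedList := buildRev lst2 lst2.length (-1) []
  -- second loop: reversedList[i] is out of range (Python IndexError) exactly when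
  -- len(lst1) > len(lst2); those inputs are excluded by Pre_reversed_list.
  let trueCounter : Int := (PySem.List.pyRange 0 (lst1.length : Int) 1).foldl
    (fun acc i => if PySem.List.pyGetD lst1 i 0 = PySem.List.pyGetD reversedList i 0 then acc + 1 else acc) 0
  if trueCounter = (lst1.length : Int) then true else false

-- ===== PORT B =====
def reversed_list_alt (lst1 : List Int) (lst2 : List Int) : Bool :=
  (PySem.List.slice lst2 (some ((lst2.length : Int) - (lst1.length : Int))) none).reverse == lst1

-- ===== PRECONDITION & SPEC =====
-- Pre_ excludes exactly the inputs where A raises IndexError (second loop reads past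
-- the end of its reversed copy when lst1 is longer than lst2).
def Pre_reversed_list (lst1 : List Int) (lst2 : List Int) : Prop := lst1.length ≤ lst2.length
instance (lst1 : List Int) (lst2 : List Int) : Decidable (Pre_reversed_list lst1 lst2) := by unfold Pre_reversed_list; infer_instance
def pvWitness_reversed_list : List Int × List Int := ([1, 2], [3, 2, 1])

def Spec_reversed_list (lst1 : List Int) (lst2 : List Int) (out : Bool) : Prop := out = reversed_list_alt lst1 lst2
instance (lst1 : List Int) (lst2 : List Int) (out : Bool) : Decidable (Spec_reversed_list lst1 lst2 out) := by unfold Spec_reversed_list; infer_instance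

-- ===== CLAIM (what is proved, stated in full; the proofs are below) =====
def Claim_equal_reversed_list : Prop := ∀ (lst1 : List Int) (lst2 : List Int), Dom_reversed_list lst1 lst2 → Pre_reversed_list lst1 lst2 → Spec_reversed_list lst1 lst2 (reversed_list lst1 lst2)

-- ===== LEMMAS AND PROOFS =====

-- A's while loop with fuel k starting at counter k - len - 1 appends l[k-1], …, l[0].
lemma buildRev_take (l : List Int) : ∀ (k : Nat), k ≤ l.length → ∀ acc,
    buildRev l k ((k : Int) - (l.length : Int) - 1) acc = acc ++ (l.take k).reverse := by
  intro k
  induction k with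
  | zero => intro _ acc; simp [buildRev]
  | succ k ih =>
    intro hk acc
    have hklt : k < l.length := by omega
    have hget : PySem.List.pyGetD l ((k : Int) + 1 - (l.length : Int) - 1) 0 = l[k] := by
      simp only [PySem.List.pyGetD, PySem.List.pyGet?, PySem.List.pyIdx?]
      have h1 : ¬ ((0 : Int) ≤ (k : Int) + 1 - (l.length : Int) - 1) := by omega
      have h2 : (-(l.length : Int)) ≤ (k : Int) + 1 - (l.length : Int) - 1 := by omega
      have h3 : (-((k : Int) + 1 - (l.length : Int) - 1)).toNat = l.length - k := by omega
      rw [if_neg h1, if_pos h2, h3]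
      have h4 : l.length - (l.length - k) = k := by omega
      rw [h4]
      simp [List.getElem?_eq_getElem hklt]
    have hstep : buildRev l (k + 1) (((k : Nat) + 1 : Int) - (l.length : Int) - 1) acc
        = buildRev l k ((k : Int) - (l.length : Int) - 1) (acc ++ [l[k]]) := by
      show buildRev l k ((((k : Nat) + 1 : Int) - (l.length : Int) - 1) - 1) _ = _
      rw [show (((k : Nat) + 1 : Int) - (l.length : Int) - 1) - 1 = (k : Int) - (l.length : Int) - 1 by ring]
      congr 1
      rw [show (((k : Nat) + 1 : Int) - (l.length : Int) - 1) = ((k : Int) + 1 - (l.length : Int) - 1) by ring, hget]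
    push_cast
    push_cast at hstep
    rw [hstep, ih (by omega) (acc ++ [l[k]])]
    have htake : (List.take (k + 1) l).reverse = l[k] :: (List.take k l).reverse := by
      rw [List.take_add_one, List.getElem?_eq_getElem hklt]
      simp
    rw [htake]
    simp

lemma buildRev_reverse (l : List Int) : buildRev l l.length (-1) [] = l.reverse := by
  have h := buildRev_take l l.length le_rfl []
  rw [show ((l.length : Int) - (l.length : Int) - 1) = (-1 : Int) by ring] at h
  simpa using h

-- positional equality on the first len(lst1) indices ↔ lst1 is a prefix of rev
lemma prefix_char (lst1 rev : List Int) (hle : lst1.length ≤ rev.length) :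
    (∀ (k : Nat) (hk : k < lst1.length), lst1[k] = rev[k]'(Nat.lt_of_lt_of_le hk hle)) ↔
      rev.take lst1.length = lst1 := by
  constructor
  · intro h
    apply List.ext_getElem (by simp [Nat.min_eq_left hle])
    intro i h1 h2
    simpa [List.getElem_take] using (h i h2).symm
  · intro h k hk
    exact (h ▸ List.take_prefix lst1.length rev : lst1 <+: rev).getElem hk

-- ===== VERDICT (by name: the statement is the Claim_ definition above) =====
theorem reversed_list_spec : Claim_equal_reversed_list := by
  intro lst1 lst2 _ hpre
  unfold Pre_reversed_list at hpre
  unfold Spec_reversed_list reversed_list reversed_list_alt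
  dsimp only
  rw [buildRev_reverse]
  have hrevlen : lst1.length ≤ lst2.reverse.length := by simpa using hpre
  have hfold := PySem.List.foldl_count_if
    (fun i => decide (PySem.List.pyGetD lst1 i 0 = PySem.List.pyGetD lst2.reverse i 0))
    (PySem.List.pyRange 0 (lst1.length : Int) 1) 0
  simp only [decide_eq_true_eq] at hfold
  rw [hfold]
  have hslice : (PySem.List.slice lst2 (some ((lst2.length : Int) - (lst1.length : Int))) none).reverse
      = lst2.reverse.take lst1.length := by
    rw [PySem.List.slice_from lst2 (by omega)]
    rw [List.reverse_drop]
    congr 1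
    omega
  rw [hslice]
  have hcount : ((0 : Int) + (List.countP (fun i => decide (PySem.List.pyGetD lst1 i 0 = PySem.List.pyGetD lst2.reverse i 0)) (PySem.List.pyRange 0 (lst1.length : Int) 1) : Int) = (lst1.length : Int))
      ↔ lst2.reverse.take lst1.length = lst1 := by
    rw [zero_add]
    have hlen : (PySem.List.pyRange 0 (lst1.length : Int) 1).length = lst1.length := by
      rw [PySem.List.length_pyRange_one]; omega
    rw [← prefix_char lst1 lst2.reverse hrevlen]
    constructor
    · intro h
      have hcp : List.countP (fun i => decide (PySem.List.pyGetD lst1 i 0 = PySem.List.pyGetD lst2.reverse i 0)) (PySem.List.pyRange 0 (lst1.length : Int) 1) = (PySem.List.pyRange 0 (lst1.length : Int) 1).length := by omega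
      rw [List.countP_eq_length] at hcp
      intro k hk
      have hmem : (k : Int) ∈ PySem.List.pyRange 0 (lst1.length : Int) 1 := by
        rw [PySem.List.mem_pyRange_one]
        constructor <;> [omega; exact_mod_cast hk]
      have hck := hcp _ hmem
      rw [PySem.List.pyGetD_eq_getElem lst1 0 (by omega) (by exact_mod_cast hk),
          PySem.List.pyGetD_eq_getElem lst2.reverse 0 (by omega) (by simp; omega)] at hck
      simpa using hck
    · intro h
      have hall : ∀ i ∈ PySem.List.pyRange 0 (lst1.length : Int) 1,
          (fun i => decide (PySem.List.pyGetD lst1 i 0 = PySem.List.pyGetD lst2.reverse i 0)) i = true := by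
        intro i hmem
        rw [PySem.List.mem_pyRange_one] at hmem
        show decide (PySem.List.pyGetD lst1 i 0 = PySem.List.pyGetD lst2.reverse i 0) = true
        have hi1 : i.toNat < lst1.length := by omega
        rw [PySem.List.pyGetD_eq_getElem lst1 0 (by omega) (by omega),
            PySem.List.pyGetD_eq_getElem lst2.reverse 0 (by omega) (by omega)]
        simp only [decide_eq_true_eq]
        exact h i.toNat hi1
      rw [← List.countP_eq_length] at hall
      omega
  by_cases hcase : lst2.reverse.take lst1.length = lst1
  · rw [if_pos (hcount.mpr hcase)]
    simp [hcase]
  · rw [if_neg (fun h => hcase (hcount.mp h))]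
    have hb : (lst2.reverse.take lst1.length == lst1) = false := by simpa using hcase
    rw [hb]
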